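-- pv_equiv track=rewrite | github.com/FranklyBreezy/Algorithms | 3314.py | minBitwiseArray
-- ===== SOURCE A (Python) =====
-- def minBitwiseArray(nums):
--     ans = []
--
--     for x in nums:
--         # If x is even, impossible
--         if x % 2 == 0:
--             ans.append(-1)
--             continue
--
--         # If x is all 1s in binary (x & (x + 1) == 0)
--         if (x & (x + 1)) == 0:
--             ans.append(x >> 1)
--             continue
--
--         # Find lowest zero bit in x
--         lowest_zero = (~x) & (x + 1)
--
--         # Compute minimum ans[i]
--         ans.append(x - (lowest_zero >> 1))
--
--     return ans
-- ===== SOURCE B (Python) =====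
-- def _min_elem(x):
--     if x % 2 == 0:
--         return -1
--     if x & (x + 1) == 0:
--         return x >> 1
--     # scan bit positions for the lowest zero bit of x
--     p = 1
--     while (x >> p) & 1 == 1:
--         p += 1
--     return x - (1 << (p - 1))
--
--
-- def minBitwiseArray(nums):
--     return [_min_elem(x) for x in nums]
-- ===== Notes on version B (the rewrite author's own statement) =====
-- stated objective: alternative
-- what changed: Replaces A's closed-form lowest-zero-bit trick (~x)&(x+1) with an explicit scan over bit positions p = 1, 2, ... until bit p of x is zero, and restructures the accumulator loop as a per-element helper mapped over the list.
import Mathlib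
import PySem

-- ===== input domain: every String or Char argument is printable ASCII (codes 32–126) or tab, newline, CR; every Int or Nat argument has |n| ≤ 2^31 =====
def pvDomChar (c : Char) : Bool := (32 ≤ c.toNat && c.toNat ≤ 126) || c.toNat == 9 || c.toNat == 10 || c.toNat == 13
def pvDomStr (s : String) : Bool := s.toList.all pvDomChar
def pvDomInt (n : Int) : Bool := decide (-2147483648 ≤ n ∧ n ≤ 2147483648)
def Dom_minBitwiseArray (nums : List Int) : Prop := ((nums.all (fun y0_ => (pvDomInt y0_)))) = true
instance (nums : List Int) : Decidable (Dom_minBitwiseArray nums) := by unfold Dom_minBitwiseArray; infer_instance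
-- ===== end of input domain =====

-- B replaces A's closed-form lowest-zero-bit trick `(~x)&(x+1)` by an explicit scan of bit
-- positions (alternative decomposition, same cost per element up to the word length).

-- ===== PORT A =====
def minBitwiseArray (nums : List Int) : List Int :=
  nums.foldl (fun ans x =>
    if PySem.Int.mod x 2 == 0 then ans ++ [-1]
    else if PySem.Int.band x (x + 1) == 0 then ans ++ [x >>> (1 : Nat)]
    else
      let lowestZero := PySem.Int.band (Int.not x) (x + 1)
      ans ++ [x - (lowestZero >>> (1 : Nat))]) []

-- ===== PORT B =====
-- the `while (x >> p) & 1 == 1: p += 1` loop of Source B, with fuel (unreachable fallback: return p)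
def pvScanZero (x : Int) : Nat → Nat → Nat
  | 0, p => p
  | f + 1, p => if PySem.Int.band (x >>> p) 1 == 1 then pvScanZero x f (p + 1) else p

def pvMinElem (x : Int) : Int :=
  if PySem.Int.mod x 2 == 0 then -1
  else if PySem.Int.band x (x + 1) == 0 then x >>> (1 : Nat)
  else x - ((1 : Int) <<< (pvScanZero x 64 1 - 1))

def minBitwiseArray_alt (nums : List Int) : List Int :=
  nums.map pvMinElem

-- ===== PRECONDITION & SPEC =====
def Spec_minBitwiseArray (nums : List Int) (out : List Int) : Prop := out = minBitwiseArray_alt nums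
instance (nums : List Int) (out : List Int) : Decidable (Spec_minBitwiseArray nums out) := by unfold Spec_minBitwiseArray; infer_instance

-- ===== CLAIM (what is proved, stated in full; the proofs are below) =====
def Claim_equal_minBitwiseArray : Prop := ∀ (nums : List Int), Dom_minBitwiseArray nums → Spec_minBitwiseArray nums (minBitwiseArray nums)

-- ===== LEMMAS AND PROOFS =====

theorem pv_testBit_pred_imp (t i : Nat) :
    (2 * t).testBit i = true → (2 * t + 1).testBit i = true := by
  cases i with
  | zero =>
      intro h
      rw [Nat.testBit_zero] at h
      simp at h
  | succ j =>
      rw [Nat.testBit_add_one, Nat.testBit_add_one]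
      have h1 : 2 * t / 2 = t := by omega
      have h2 : (2 * t + 1) / 2 = t := by omega
      rw [h1, h2]; exact id

theorem pv_land_pred (k m : Nat) (hm : m % 2 = 1) :
    (2 ^ k * m) &&& (2 ^ k * m - 1) = 2 ^ k * m - 2 ^ k := by
  obtain ⟨t, rfl⟩ : ∃ t, m = 2 * t + 1 := ⟨m / 2, by omega⟩
  have hp : 1 ≤ 2 ^ k := Nat.one_le_two_pow
  have e1 : 2 ^ k * (2 * t + 1) = 2 * (2 ^ k * t) + 2 ^ k := by ring
  have e2 : 2 ^ k * (2 * t) = 2 * (2 ^ k * t) := by ring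
  have hsub1 : 2 ^ k * (2 * t + 1) - 1 = 2 ^ k * (2 * t) + (2 ^ k - 1) := by
    rw [e1, e2]; omega
  have hsub2 : 2 ^ k * (2 * t + 1) - 2 ^ k = 2 ^ k * (2 * t) := by
    rw [e1, e2]; omega
  rw [hsub1, hsub2]
  apply Nat.eq_of_testBit_eq
  intro j
  rw [Nat.testBit_land, Nat.testBit_two_pow_mul,
      Nat.testBit_two_pow_mul_add _ (by omega), Nat.testBit_two_pow_mul]
  by_cases hj : j < k
  · simp [hj, show ¬ (j ≥ k) by omega]
  · have hge : j ≥ k := by omega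
    simp [hj, hge]
    cases hbt : (2 * t).testBit (j - k) with
    | true => simp [pv_testBit_pred_imp _ _ hbt]
    | false => simp

theorem pv_not_eq (x : Int) : Int.not x = -x - 1 := by
  cases x with
  | ofNat n => simp [Int.not, Int.negSucc_eq]; ring
  | negSucc n => simp [Int.not, Int.negSucc_eq]

theorem pv_band_not (x : Int) (k m : Nat) (hm : m % 2 = 1)
    (hn : (x + 1).natAbs = 2 ^ k * m) (hx0 : x + 1 ≠ 0) :
    PySem.Int.band (Int.not x) (x + 1) = ((2 ^ k : Nat) : Int) := by
  have hp : 1 ≤ 2 ^ k := Nat.one_le_two_pow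
  have hmle : 2 ^ k ≤ 2 ^ k * m := Nat.le_mul_of_pos_right _ (by omega)
  have hland := pv_land_pred k m hm
  rw [pv_not_eq]
  rcases lt_or_gt_of_ne hx0 with hneg | hpos
  · -- x + 1 < 0 : a = -x-1 ≥ 0, b = x+1 < 0
    rw [PySem.Int.band]
    rw [if_pos (by omega), if_neg (by omega)]
    have e1 : (-x - 1).toNat = 2 ^ k * m := by omega
    have e2 : (-(x + 1) - 1).toNat = 2 ^ k * m - 1 := by omega
    rw [e1, e2, hland]
    omega
  · -- x + 1 > 0 : a = -x-1 < 0, b = x+1 ≥ 0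
    rw [PySem.Int.band]
    rw [if_neg (by omega), if_pos (by omega)]
    have e1 : (x + 1).toNat = 2 ^ k * m := by omega
    have e2 : (-(-x - 1) - 1).toNat = 2 ^ k * m - 1 := by omega
    rw [e1, e2, hland]
    omega

theorem pv_shift_exact (x c : Int) (p : Nat) (h : x + 1 = 2 ^ p * c) :
    x >>> p = c - 1 := by
  have h2 : (0 : Int) < 2 ^ p := by positivity
  have hx : x = (2 ^ p - 1) + 2 ^ p * (c - 1) := by rw [mul_sub] at *; omega
  rw [Int.shiftRight_eq_div_pow, hx]
  push_cast
  rw [Int.add_mul_ediv_left _ _ (by omega), Int.ediv_eq_zero_of_lt (by omega) (by omega)]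
  omega

theorem pv_parity (x : Int) (k m : Nat) (hm : m % 2 = 1)
    (hn : (x + 1).natAbs = 2 ^ k * m) (hx0 : x + 1 ≠ 0) (p : Nat) (hpk : p ≤ k) :
    (x >>> p) % 2 = if p < k then 1 else 0 := by
  have hsplit : 2 ^ k * m = 2 ^ p * (2 ^ (k - p) * m) := by
    rw [← mul_assoc, ← pow_add]
    congr 2
    omega
  have hNmod : (2 ^ (k - p) * m) % 2 = if p < k then 0 else 1 := by
    by_cases hlt : p < k
    · have : 2 ^ (k - p) * m = 2 * (2 ^ (k - p - 1) * m) := by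
        rw [← mul_assoc, ← pow_succ']
        congr 2
        omega
      simp [hlt]
      omega
    · have : k - p = 0 := by omega
      simp [hlt, this, hm]
  have hcast : ((2 ^ k * m : Nat) : Int) = (2 : Int) ^ p * ((2 ^ (k - p) * m : Nat) : Int) := by
    rw [hsplit]
    push_cast
    ring
  generalize hN : ((2 ^ (k - p) * m : Nat) : Int) = N at hcast
  have hNm : N % 2 = if p < k then 0 else 1 := by
    by_cases hlt : p < k
    · rw [if_pos hlt] at hNmod ⊢
      rw [← hN]
      omega
    · rw [if_neg hlt] at hNmod ⊢
      rw [← hN]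
      omega
  have habs : x + 1 = ((2 ^ k * m : Nat) : Int) ∨ x + 1 = -((2 ^ k * m : Nat) : Int) := by
    omega
  rcases habs with h | h
  · rw [pv_shift_exact x N p (by rw [h, hcast])]
    by_cases hlt : p < k
    · simp only [if_pos hlt] at hNm ⊢
      omega
    · simp only [if_neg hlt] at hNm ⊢
      omega
  · rw [pv_shift_exact x (-N) p (by rw [h, hcast]; ring)]
    by_cases hlt : p < k
    · simp only [if_pos hlt] at hNm ⊢
      omega
    · simp only [if_neg hlt] at hNm ⊢
      omega

theorem pv_mod_two (x : Int) : PySem.Int.mod x 2 = x % 2 := by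
  simp [PySem.Int.mod, Int.fmod_eq_emod]

theorem pv_scan (x : Int) (k m : Nat) (hm : m % 2 = 1)
    (hn : (x + 1).natAbs = 2 ^ k * m) (hx0 : x + 1 ≠ 0) :
    ∀ f p, 1 ≤ p → p ≤ k → k ≤ p + f → pvScanZero x f p = k := by
  intro f
  induction f with
  | zero =>
      intro p h1 h2 h3
      have : p = k := by omega
      simpa [pvScanZero] using this
  | succ g ih =>
      intro p h1 h2 h3
      have hpar := pv_parity x k m hm hn hx0 p h2
      by_cases hlt : p < k
      · rw [if_pos hlt] at hpar
        simp only [pvScanZero, PySem.Int.band_one, pv_mod_two, hpar]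
        simpa using ih (p + 1) (by omega) (by omega) (by omega)
      · have hpk : p = k := by omega
        rw [if_neg hlt] at hpar
        simp only [pvScanZero, PySem.Int.band_one, pv_mod_two, hpar]
        simpa using hpk

theorem pv_elem_eq (x : Int) (h1 : -2147483648 ≤ x) (h2 : x ≤ 2147483648) :
    (if PySem.Int.mod x 2 == 0 then (-1 : Int)
     else if PySem.Int.band x (x + 1) == 0 then x >>> (1 : Nat)
     else x - ((PySem.Int.band (Int.not x) (x + 1)) >>> (1 : Nat))) = pvMinElem x := by
  rw [pvMinElem]
  by_cases hg1 : PySem.Int.mod x 2 == 0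
  · rw [if_pos hg1, if_pos hg1]
  rw [if_neg hg1, if_neg hg1]
  by_cases hg2 : PySem.Int.band x (x + 1) == 0
  · rw [if_pos hg2, if_pos hg2]
  rw [if_neg hg2, if_neg hg2]
  -- x is odd
  have hodd : x % 2 = 1 := by
    simp at hg1
    omega
  -- x + 1 ≠ 0, else the second guard would have fired
  have hx0 : x + 1 ≠ 0 := by
    intro h
    apply hg2
    rw [h, PySem.Int.band_zero]
    rfl
  obtain ⟨k, m, hmo, hn⟩ := Nat.exists_eq_two_pow_mul_odd (n := (x + 1).natAbs) (by omega)
  have hm : m % 2 = 1 := Nat.odd_iff.mp hmo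
  have hk1 : 1 ≤ k := by
    by_contra hk
    have : k = 0 := by omega
    rw [this] at hn
    simp at hn
    omega
  have hk31 : k ≤ 31 := by
    by_contra hk
    have h32 : 2 ^ 32 ≤ 2 ^ k := Nat.pow_le_pow_right (by norm_num) (by omega)
    have hle : 2 ^ k ≤ 2 ^ k * m := Nat.le_mul_of_pos_right _ (by omega)
    have : (2 : Nat) ^ 32 = 4294967296 := by norm_num
    omega
  have hscan : pvScanZero x 64 1 = k :=
    pv_scan x k m hm hn hx0 64 1 (by omega) (by omega) (by omega)
  rw [hscan, pv_band_not x k m hm hn hx0]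
  have hp : (2 : Nat) ^ k = 2 * 2 ^ (k - 1) := by
    rw [← pow_succ']
    congr 1
    omega
  rw [Int.shiftRight_eq_div_pow, Int.shiftLeft_eq, hp]
  push_cast
  rw [Int.mul_ediv_cancel_left _ (by norm_num)]
  ring


theorem pv_foldl_eq (nums : List Int) (acc : List Int) :
    nums.foldl (fun ans x =>
      if PySem.Int.mod x 2 == 0 then ans ++ [-1]
      else if PySem.Int.band x (x + 1) == 0 then ans ++ [x >>> (1 : Nat)]
      else
        let lowestZero := PySem.Int.band (Int.not x) (x + 1)
        ans ++ [x - (lowestZero >>> (1 : Nat))]) acc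
    = acc ++ nums.map (fun x =>
        if PySem.Int.mod x 2 == 0 then (-1 : Int)
        else if PySem.Int.band x (x + 1) == 0 then x >>> (1 : Nat)
        else x - ((PySem.Int.band (Int.not x) (x + 1)) >>> (1 : Nat))) := by
  induction nums generalizing acc with
  | nil => simp
  | cons y ys ih =>
      simp only [List.foldl_cons, List.map_cons, ih]
      split_ifs <;> simp

-- ===== VERDICT (by name: the statement is the Claim_ definition above) =====
theorem minBitwiseArray_spec : Claim_equal_minBitwiseArray := by
  intro nums hdom
  unfold Spec_minBitwiseArray minBitwiseArray minBitwiseArray_alt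
  rw [pv_foldl_eq, List.nil_append]
  apply List.map_congr_left
  intro x hx
  have hd : pvDomInt x = true := by
    have := (List.all_eq_true.mp hdom) x hx
    simpa using this
  have hb : -2147483648 ≤ x ∧ x ≤ 2147483648 := by
    simpa [pvDomInt] using hd
  exact pv_elem_eq x hb.1 hb.2
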